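-- pv_equiv track=rewrite | github.com/Jaideepgarlyal15/quantonion | core/hmm_model.py | regime_segments
-- ===== SOURCE A (Python) =====
-- def regime_segments(index, states, labels_dict):
--     """
--     Convert a state series into (start, end, label) segments for plotting.
--     """
--     out = []
--     start_idx = 0
--     for i in range(1, len(states)):
--         if states[i] != states[i - 1]:
--             out.append(
--                 (index[start_idx], index[i - 1], labels_dict.get(states[i - 1], "Unknown"))
--             )
--             start_idx = i
--     out.append((index[start_idx], index[-1], labels_dict.get(states[-1], "Unknown")))
--     return out
-- ===== SOURCE B (Python) =====
-- def regime_segments(index, states, labels_dict):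
--     """
--     Convert a state series into (start, end, label) segments for plotting.
--
--     Two-pass decomposition: first build the change-point boundary table,
--     then zip segment starts with segment ends.
--     """
--     cp = [i for i in range(1, len(states)) if states[i] != states[i - 1]]
--     starts = [0] + cp
--     ends = [index[i - 1] for i in cp] + [index[-1]]
--     return [(index[s], e, labels_dict.get(states[s], "Unknown"))
--             for s, e in zip(starts, ends)]
-- ===== Notes on version B (the rewrite author's own statement) =====
-- stated objective: alternative
-- what changed: B first computes the change-point boundary table (cp), derives the start and end lists from it, and builds all segments by zipping starts with ends and labelling each segment by its START state, instead of A's single scan that appends inline while tracking start_idx in an accumulator and labels by states[i-1].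
import Mathlib
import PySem

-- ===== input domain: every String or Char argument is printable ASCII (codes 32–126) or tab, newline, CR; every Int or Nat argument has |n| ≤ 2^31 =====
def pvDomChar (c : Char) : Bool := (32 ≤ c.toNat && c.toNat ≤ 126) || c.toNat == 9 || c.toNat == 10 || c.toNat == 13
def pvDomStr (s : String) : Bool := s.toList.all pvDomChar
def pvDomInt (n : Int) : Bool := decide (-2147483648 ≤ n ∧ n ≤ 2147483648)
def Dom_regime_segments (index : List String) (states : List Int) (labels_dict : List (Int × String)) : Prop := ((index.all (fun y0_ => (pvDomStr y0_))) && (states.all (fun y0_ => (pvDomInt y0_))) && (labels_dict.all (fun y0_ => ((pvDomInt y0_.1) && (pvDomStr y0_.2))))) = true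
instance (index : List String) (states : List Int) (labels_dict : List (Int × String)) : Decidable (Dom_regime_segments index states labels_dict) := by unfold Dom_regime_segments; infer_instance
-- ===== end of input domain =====

-- B replaces A's single accumulating scan by a two-pass decomposition (change-point table, then zip of starts/ends); objective: alternative structure, same cost.


-- shared primitive ports: index[i] (IndexError excluded by Pre_, so the default is never reached on admitted inputs),
-- and labels_dict.get(states[j], "Unknown") applied to the Option from states[j]
def pvGetS (xs : List String) (i : Int) : String := (PySem.List.pyGet? xs i).getD ""
def pvLab (labels_dict : List (Int × String)) (s : Option Int) : String :=
  match s with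
  | some k => (PySem.Dict.mk labels_dict).getD k "Unknown"
  | none => "Unknown"

-- ===== PORT A =====
-- loop body of A: on a change point append the finished segment (labelled by states[i-1]) and move start_idx to i
def pvStepA (index : List String) (states : List Int) (labels_dict : List (Int × String))
    (acc : List (String × String × String) × Int) (i : Int) : List (String × String × String) × Int :=
  if PySem.List.pyGet? states i != PySem.List.pyGet? states (i - 1) then
    (acc.1 ++ [(pvGetS index acc.2, pvGetS index (i - 1), pvLab labels_dict (PySem.List.pyGet? states (i - 1)))], i)
  else acc

def regime_segments (index : List String) (states : List Int) (labels_dict : List (Int × String)) : List (String × String × String) :=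
  let t := (PySem.List.pyRange 1 (states.length : Int) 1).foldl (pvStepA index states labels_dict) ([], 0)
  t.1 ++ [(pvGetS index t.2, pvGetS index (-1), pvLab labels_dict (PySem.List.pyGet? states (-1)))]

-- ===== PORT B =====
def regime_segments_alt (index : List String) (states : List Int) (labels_dict : List (Int × String)) : List (String × String × String) :=
  let cp := (PySem.List.pyRange 1 (states.length : Int) 1).filter
      (fun i => PySem.List.pyGet? states i != PySem.List.pyGet? states (i - 1))
  let starts := 0 :: cp
  let ends := cp.map (fun i => pvGetS index (i - 1)) ++ [pvGetS index (-1)]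
  (starts.zip ends).map (fun p => (pvGetS index p.1, p.2, pvLab labels_dict (PySem.List.pyGet? states p.1)))

-- ===== PRECONDITION & SPEC =====
-- Pre_ is exactly where the Python A returns: states and index nonempty (else the final index[-1]/states[-1] raises
-- IndexError) and every change point i strictly below len(index) (else index[i-1]/index[start_idx] raises IndexError).
def Pre_regime_segments (index : List String) (states : List Int) (labels_dict : List (Int × String)) : Prop :=
  states ≠ [] ∧ index ≠ [] ∧
    ∀ i : Nat, i < states.length → 0 < i → states.getD i 0 ≠ states.getD (i - 1) 0 → i < index.length
instance (index : List String) (states : List Int) (labels_dict : List (Int × String)) : Decidable (Pre_regime_segments index states labels_dict) := by unfold Pre_regime_segments; infer_instance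

def pvWitness_regime_segments : List String × List Int × (List (Int × String)) :=
  (["a", "b", "c", "d"], [1, 1, 2, 2], [(1, "Bull"), (2, "Bear")])

def Spec_regime_segments (index : List String) (states : List Int) (labels_dict : List (Int × String)) (out : List (String × String × String)) : Prop := out = regime_segments_alt index states labels_dict
instance (index : List String) (states : List Int) (labels_dict : List (Int × String)) (out : List (String × String × String)) : Decidable (Spec_regime_segments index states labels_dict out) := by unfold Spec_regime_segments; infer_instance

-- ===== CLAIM (what is proved, stated in full; the proofs are below) =====
def Claim_equal_regime_segments : Prop := ∀ (index : List String) (states : List Int) (labels_dict : List (Int × String)), Dom_regime_segments index states labels_dict → Pre_regime_segments index states labels_dict → Spec_regime_segments index states labels_dict (regime_segments index states labels_dict)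

-- ===== LEMMAS AND PROOFS =====

-- A's loop-plus-final-append, parametrized by the remaining range and the accumulator
def pvRunA (index : List String) (states : List Int) (labels_dict : List (Int × String))
    (r : List Int) (out : List (String × String × String)) (s : Int) : List (String × String × String) :=
  let t := r.foldl (pvStepA index states labels_dict) (out, s)
  t.1 ++ [(pvGetS index t.2, pvGetS index (-1), pvLab labels_dict (PySem.List.pyGet? states (-1)))]

-- B's output for a tail r of the index range, with current segment start s
def pvSegB (index : List String) (states : List Int) (labels_dict : List (Int × String))
    (r : List Int) (s : Int) : List (String × String × String) :=
  let cp := r.filter (fun i => PySem.List.pyGet? states i != PySem.List.pyGet? states (i - 1))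
  ((s :: cp).zip (cp.map (fun i => pvGetS index (i - 1)) ++ [pvGetS index (-1)])).map
    (fun p => (pvGetS index p.1, p.2, pvLab labels_dict (PySem.List.pyGet? states p.1)))

lemma runA_eq (index : List String) (states : List Int) (labels_dict : List (Int × String)) :
    regime_segments index states labels_dict
      = pvRunA index states labels_dict (PySem.List.pyRange 1 (states.length : Int) 1) [] 0 := rfl

lemma altB_eq (index : List String) (states : List Int) (labels_dict : List (Int × String)) :
    regime_segments_alt index states labels_dict
      = pvSegB index states labels_dict (PySem.List.pyRange 1 (states.length : Int) 1) 0 := rfl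

lemma runA_nil (index : List String) (states : List Int) (labels_dict : List (Int × String))
    (out : List (String × String × String)) (s : Int) :
    pvRunA index states labels_dict [] out s
      = out ++ [(pvGetS index s, pvGetS index (-1), pvLab labels_dict (PySem.List.pyGet? states (-1)))] := by
  simp [pvRunA]

lemma runA_cons (index : List String) (states : List Int) (labels_dict : List (Int × String))
    (i : Int) (r : List Int) (out : List (String × String × String)) (s : Int) :
    pvRunA index states labels_dict (i :: r) out s
      = if PySem.List.pyGet? states i != PySem.List.pyGet? states (i - 1) then
          pvRunA index states labels_dict r
            (out ++ [(pvGetS index s, pvGetS index (i - 1), pvLab labels_dict (PySem.List.pyGet? states (i - 1)))]) i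
        else pvRunA index states labels_dict r out s := by
  by_cases h : PySem.List.pyGet? states i != PySem.List.pyGet? states (i - 1) <;>
    simp [pvRunA, pvStepA, h]

lemma segB_nil (index : List String) (states : List Int) (labels_dict : List (Int × String)) (s : Int) :
    pvSegB index states labels_dict [] s
      = [(pvGetS index s, pvGetS index (-1), pvLab labels_dict (PySem.List.pyGet? states s))] := by
  simp [pvSegB]

lemma segB_cons (index : List String) (states : List Int) (labels_dict : List (Int × String))
    (i : Int) (r : List Int) (s : Int) :
    pvSegB index states labels_dict (i :: r) s
      = if PySem.List.pyGet? states i != PySem.List.pyGet? states (i - 1) then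
          (pvGetS index s, pvGetS index (i - 1), pvLab labels_dict (PySem.List.pyGet? states s))
            :: pvSegB index states labels_dict r i
        else pvSegB index states labels_dict r s := by
  by_cases h : PySem.List.pyGet? states i != PySem.List.pyGet? states (i - 1) <;>
    simp [pvSegB, h]

lemma main_lemma (index : List String) (states : List Int) (labels_dict : List (Int × String)) :
    ∀ (k : Nat) (a s : Int) (out : List (String × String × String)),
      a = (states.length : Int) - k → 0 ≤ s → s < a →
      (∀ j : Int, s ≤ j → j < a → PySem.List.pyGet? states j = PySem.List.pyGet? states s) →
      pvRunA index states labels_dict (PySem.List.pyRange a (states.length : Int) 1) out s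
        = out ++ pvSegB index states labels_dict (PySem.List.pyRange a (states.length : Int) 1) s := by
  intro k
  induction k with
  | zero =>
    intro a s out ha hs0 hsa hinv
    have hrange : PySem.List.pyRange a (states.length : Int) 1 = [] :=
      PySem.List.pyRange_one_eq_nil (by omega)
    have hlast : PySem.List.pyGet? states (-1) = PySem.List.pyGet? states s := by
      have h1 : PySem.List.pyGet? states (-1) = states.getLast? := PySem.List.pyGet?_neg_one states
      have h2 : PySem.List.pyGet? states ((states.length : Int) - 1)
          = PySem.List.pyGet? states s := hinv _ (by omega) (by omega)
      have h3 : PySem.List.pyGet? states ((states.length : Int) - 1)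
          = states[((states.length : Int) - 1).toNat]? :=
        PySem.List.pyGet?_of_nonneg states (by omega)
      have h4 : ((states.length : Int) - 1).toNat = states.length - 1 := by omega
      rw [h1, List.getLast?_eq_getElem?, ← h2, h3, h4]
    rw [hrange, runA_nil, segB_nil, hlast]
  | succ k ih =>
    intro a s out ha hs0 hsa hinv
    have halt : a < (states.length : Int) := by omega
    rw [PySem.List.pyRange_one_cons halt, runA_cons, segB_cons]
    by_cases h : PySem.List.pyGet? states a != PySem.List.pyGet? states (a - 1)
    · rw [if_pos h, if_pos h]
      have hlab : PySem.List.pyGet? states (a - 1) = PySem.List.pyGet? states s :=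
        hinv _ (by omega) (by omega)
      rw [hlab]
      rw [ih (a + 1) a _ (by omega) (by omega) (by omega)
        (by intro j hj1 hj2
            have hj : j = a := by omega
            rw [hj])]
      simp
    · rw [if_neg h, if_neg h]
      have heq : PySem.List.pyGet? states a = PySem.List.pyGet? states (a - 1) := by
        simpa using h
      exact ih (a + 1) s out (by omega) hs0 (by omega)
        (by intro j hj1 hj2
            by_cases hja : j < a
            · exact hinv j hj1 hja
            · have hj : j = a := by omega
              rw [hj, heq]
              exact hinv (a - 1) (by omega) (by omega))

-- ===== VERDICT (by name: the statement is the Claim_ definition above) =====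
theorem regime_segments_spec : Claim_equal_regime_segments := by
  intro index states labels_dict _ _
  unfold Spec_regime_segments
  rw [runA_eq, altB_eq]
  by_cases hn : states.length = 0
  · have hs : states = [] := List.length_eq_zero_iff.mp hn
    subst hs
    have hrange : PySem.List.pyRange 1 ((List.length ([] : List Int)) : Int) 1 = [] :=
      PySem.List.pyRange_one_eq_nil (by simp)
    rw [hrange, runA_nil, segB_nil]
    simp [PySem.List.pyGet?, PySem.List.pyIdx?]
  · have h1 : (1 : Int) = (states.length : Int) - ((states.length - 1 : Nat) : Int) := by
      have : 1 ≤ states.length := Nat.one_le_iff_ne_zero.mpr hn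
      omega
    exact main_lemma index states labels_dict (states.length - 1) 1 0 []
      h1 le_rfl (by norm_num)
      (by intro j hj1 hj2
          have hj : j = 0 := by omega
          rw [hj])
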